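-- pv_equiv track=rewrite | github.com/AgenticsFintekColumbia/Multi-Agent-Analyst | multi_recommender.py | _combine_ratings
-- ===== SOURCE A (Python) =====
-- from typing import List, Optional
-- from collections import Counter
--
-- def _combine_ratings(fund_rating: Optional[str],
--                      tech_rating: Optional[str],
--                      news_rating: Optional[str]) -> str:
--     """
--     Combine the three analyst ratings into a single final rating.
--
--     Simple rule:
--     - Use majority vote over {fund, tech, news} (ignoring None).
--     - If all three disagree or there is a tie -> return 'Hold'.
--     - If no rating at all -> return 'Unknown'.
--     """
--     ratings = [r for r in [fund_rating, tech_rating, news_rating] if r is not None]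
--
--     if not ratings:
--         return "Unknown"
--
--     counts = Counter(ratings)
--     #Most common returns list of tuples sorted by count desc
--     most_common = counts.most_common()
--
--     if len(most_common) == 1:
--         # Only one unique rating
--         return most_common[0][0]
--
--     #Check for a clear majority (e.g., 2 vs 1)
--     if most_common[0][1] > most_common[1][1]:
--         return most_common[0][0]
--
--     #Otherwise, tie or all different -> default to Hold
--     return "Hold"
-- ===== SOURCE B (Python) =====
-- def _combine_ratings(fund_rating, tech_rating, news_rating):
--     ratings = [r for r in (fund_rating, tech_rating, news_rating) if r is not None]
--     if not ratings:
--         return "Unknown"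
--     # a value occurring on strictly more than half the votes is the unique winner
--     for r in ratings:
--         if ratings.count(r) * 2 > len(ratings):
--             return r
--     return "Hold"
-- ===== Notes on version B (the rewrite author's own statement) =====
-- stated objective: simpler
-- what changed: Replaces the Counter frequency table, descending-sorted most_common list and top-two-count comparison with a single scan of the filtered votes returning the first value whose count is a strict majority (count*2 > len), else 'Hold'.
import Mathlib
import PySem

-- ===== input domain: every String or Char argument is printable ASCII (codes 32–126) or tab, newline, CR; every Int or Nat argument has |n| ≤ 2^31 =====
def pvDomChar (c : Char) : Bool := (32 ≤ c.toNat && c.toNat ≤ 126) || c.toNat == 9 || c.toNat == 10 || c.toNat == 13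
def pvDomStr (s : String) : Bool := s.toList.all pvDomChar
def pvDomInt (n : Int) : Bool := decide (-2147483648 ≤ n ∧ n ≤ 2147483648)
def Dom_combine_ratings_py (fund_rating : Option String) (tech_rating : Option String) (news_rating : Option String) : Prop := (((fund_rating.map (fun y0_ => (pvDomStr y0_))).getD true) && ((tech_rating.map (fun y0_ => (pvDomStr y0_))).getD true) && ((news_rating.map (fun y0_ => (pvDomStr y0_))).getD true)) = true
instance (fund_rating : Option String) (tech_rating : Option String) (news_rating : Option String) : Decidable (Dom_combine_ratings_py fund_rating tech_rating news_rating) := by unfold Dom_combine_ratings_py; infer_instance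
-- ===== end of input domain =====

-- B replaces A's Counter + sorted-frequency-table + top-two comparison by a single
-- first-strict-majority scan over the filtered votes (objective: simpler).


-- ===== PORT A =====
def combine_ratings_py (fund_rating : Option String) (tech_rating : Option String) (news_rating : Option String) : String :=
  -- ratings = [r for r in [fund_rating, tech_rating, news_rating] if r is not None]
  let ratings : List String := [fund_rating, tech_rating, news_rating].filterMap id
  if ratings = [] then "Unknown"
  else
    -- counts = Counter(ratings); most_common = counts.most_common()
    let counts := PySem.Dict.counter ratings
    let most_common := PySem.List.sorted counts.items (fun p => p.2) true
    match most_common with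
    | [p] => p.1                                  -- len(most_common) == 1
    | p0 :: p1 :: _ => if p0.2 > p1.2 then p0.1 else "Hold"
    | [] => "Hold"                                -- unreachable: ratings nonempty

-- ===== PORT B =====
def combine_ratings_py_alt (fund_rating : Option String) (tech_rating : Option String) (news_rating : Option String) : String :=
  let ratings : List String := [fund_rating, tech_rating, news_rating].filterMap id
  if ratings.isEmpty then "Unknown"
  else
    match ratings.find? (fun r => ratings.count r * 2 > ratings.length) with
    | some r => r
    | none => "Hold"

-- ===== PRECONDITION & SPEC =====
def Spec_combine_ratings_py (fund_rating : Option String) (tech_rating : Option String) (news_rating : Option String) (out : String) : Prop := out = combine_ratings_py_alt fund_rating tech_rating news_rating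
instance (fund_rating : Option String) (tech_rating : Option String) (news_rating : Option String) (out : String) : Decidable (Spec_combine_ratings_py fund_rating tech_rating news_rating out) := by unfold Spec_combine_ratings_py; infer_instance

-- ===== CLAIM (what is proved, stated in full; the proofs are below) =====
def Claim_equal_combine_ratings_py : Prop := ∀ (fund_rating : Option String) (tech_rating : Option String) (news_rating : Option String), Dom_combine_ratings_py fund_rating tech_rating news_rating → Spec_combine_ratings_py fund_rating tech_rating news_rating (combine_ratings_py fund_rating tech_rating news_rating)

-- ===== LEMMAS AND PROOFS =====

-- ===== VERDICT (by name: the statement is the Claim_ definition above) =====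
theorem combine_ratings_py_spec : Claim_equal_combine_ratings_py := by
  intro f t n _
  unfold Spec_combine_ratings_py
  rcases f with _ | a <;> rcases t with _ | b <;> rcases n with _ | c
  · rfl
  · simp [combine_ratings_py, combine_ratings_py_alt, PySem.Dict.counter, PySem.Dict.modify, PySem.Dict.empty,
      PySem.Dict.insert, PySem.Dict.get?, PySem.Dict.getD,
      PySem.List.sorted, PySem.List.insertBy, List.count, List.countP, List.countP.go, List.find?]
  · simp [combine_ratings_py, combine_ratings_py_alt, PySem.Dict.counter, PySem.Dict.modify, PySem.Dict.empty,
      PySem.Dict.insert, PySem.Dict.get?, PySem.Dict.getD,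
      PySem.List.sorted, PySem.List.insertBy, List.count, List.countP, List.countP.go, List.find?]
  · by_cases h : b = c
    · subst h
      simp [combine_ratings_py, combine_ratings_py_alt, PySem.Dict.counter, PySem.Dict.modify, PySem.Dict.empty,
        PySem.Dict.insert, PySem.Dict.get?, PySem.Dict.getD,
        PySem.List.sorted, PySem.List.insertBy, List.count, List.countP, List.countP.go, List.find?]
    · simp [combine_ratings_py, combine_ratings_py_alt, PySem.Dict.counter, PySem.Dict.modify, PySem.Dict.empty,
        PySem.Dict.insert, PySem.Dict.get?, PySem.Dict.getD,
        PySem.List.sorted, PySem.List.insertBy, List.count, List.countP, List.countP.go, List.find?,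
        beq_eq_false_iff_ne.mpr h, beq_eq_false_iff_ne.mpr (Ne.symm h)]
  · simp [combine_ratings_py, combine_ratings_py_alt, PySem.Dict.counter, PySem.Dict.modify, PySem.Dict.empty,
      PySem.Dict.insert, PySem.Dict.get?, PySem.Dict.getD,
      PySem.List.sorted, PySem.List.insertBy, List.count, List.countP, List.countP.go, List.find?]
  · by_cases h : a = c
    · subst h
      simp [combine_ratings_py, combine_ratings_py_alt, PySem.Dict.counter, PySem.Dict.modify, PySem.Dict.empty,
        PySem.Dict.insert, PySem.Dict.get?, PySem.Dict.getD,
        PySem.List.sorted, PySem.List.insertBy, List.count, List.countP, List.countP.go, List.find?]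
    · simp [combine_ratings_py, combine_ratings_py_alt, PySem.Dict.counter, PySem.Dict.modify, PySem.Dict.empty,
        PySem.Dict.insert, PySem.Dict.get?, PySem.Dict.getD,
        PySem.List.sorted, PySem.List.insertBy, List.count, List.countP, List.countP.go, List.find?,
        beq_eq_false_iff_ne.mpr h, beq_eq_false_iff_ne.mpr (Ne.symm h)]
  · by_cases h : a = b
    · subst h
      simp [combine_ratings_py, combine_ratings_py_alt, PySem.Dict.counter, PySem.Dict.modify, PySem.Dict.empty,
        PySem.Dict.insert, PySem.Dict.get?, PySem.Dict.getD,
        PySem.List.sorted, PySem.List.insertBy, List.count, List.countP, List.countP.go, List.find?]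
    · simp [combine_ratings_py, combine_ratings_py_alt, PySem.Dict.counter, PySem.Dict.modify, PySem.Dict.empty,
        PySem.Dict.insert, PySem.Dict.get?, PySem.Dict.getD,
        PySem.List.sorted, PySem.List.insertBy, List.count, List.countP, List.countP.go, List.find?,
        beq_eq_false_iff_ne.mpr h, beq_eq_false_iff_ne.mpr (Ne.symm h)]
  · by_cases hab : a = b
    · subst hab
      by_cases hac : a = c
      · subst hac
        simp [combine_ratings_py, combine_ratings_py_alt, PySem.Dict.counter, PySem.Dict.modify, PySem.Dict.empty,
          PySem.Dict.insert, PySem.Dict.get?, PySem.Dict.getD,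
          PySem.List.sorted, PySem.List.insertBy, List.count, List.countP, List.countP.go, List.find?]
      · simp [combine_ratings_py, combine_ratings_py_alt, PySem.Dict.counter, PySem.Dict.modify, PySem.Dict.empty,
          PySem.Dict.insert, PySem.Dict.get?, PySem.Dict.getD,
          PySem.List.sorted, PySem.List.insertBy, List.count, List.countP, List.countP.go, List.find?,
          beq_eq_false_iff_ne.mpr hac, beq_eq_false_iff_ne.mpr (Ne.symm hac)]
    · by_cases hac : a = c
      · subst hac
        simp [combine_ratings_py, combine_ratings_py_alt, PySem.Dict.counter, PySem.Dict.modify, PySem.Dict.empty,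
          PySem.Dict.insert, PySem.Dict.get?, PySem.Dict.getD,
          PySem.List.sorted, PySem.List.insertBy, List.count, List.countP, List.countP.go, List.find?,
          beq_eq_false_iff_ne.mpr hab, beq_eq_false_iff_ne.mpr (Ne.symm hab), Ne.symm hab]
      · by_cases hbc : b = c
        · subst hbc
          simp [combine_ratings_py, combine_ratings_py_alt, PySem.Dict.counter, PySem.Dict.modify, PySem.Dict.empty,
            PySem.Dict.insert, PySem.Dict.get?, PySem.Dict.getD,
            PySem.List.sorted, PySem.List.insertBy, List.count, List.countP, List.countP.go, List.find?,
            beq_eq_false_iff_ne.mpr hab, beq_eq_false_iff_ne.mpr (Ne.symm hab), hab]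
        · simp [combine_ratings_py, combine_ratings_py_alt, PySem.Dict.counter, PySem.Dict.modify, PySem.Dict.empty,
            PySem.Dict.insert, PySem.Dict.get?, PySem.Dict.getD,
            PySem.List.sorted, PySem.List.insertBy, List.count, List.countP, List.countP.go, List.find?,
            beq_eq_false_iff_ne.mpr hab, beq_eq_false_iff_ne.mpr (Ne.symm hab),
            beq_eq_false_iff_ne.mpr hac, beq_eq_false_iff_ne.mpr (Ne.symm hac),
            beq_eq_false_iff_ne.mpr hbc, beq_eq_false_iff_ne.mpr (Ne.symm hbc)]
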